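-- pv_equiv track=rewrite | github.com/veronicanh/advent_of_code_21 | 17_Trick_Shot.py | reachesTarget
-- ===== SOURCE A (Python) =====
-- def reachesTarget(xVel, yVel, xTarget, yTarget):
--     xPos = 0
--     yPos = 0
--
--     while ((xPos <= xTarget[1]) and (yPos >= yTarget[0])):
--         xPos += xVel
--         yPos += yVel
--
--         if (xVel > 0):
--             xVel -= 1
--         yVel -= 1
--
--         if ((xTarget[0] <= xPos <= xTarget[1]) and
--             (yTarget[0] <= yPos <= yTarget[1])):
--             return True
--
--     return False
-- ===== SOURCE B (Python) =====
-- def reachesTarget(xVel, yVel, xTarget, yTarget):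
--     # closed-form positions: x(t) stalls once xVel is exhausted, y(t) is a parabola
--     def xAt(t):
--         if xVel <= 0:
--             return xVel * t
--         if xVel <= t:
--             return xVel * (xVel + 1) // 2
--         return xVel * t - t * (t - 1) // 2
--
--     def yAt(t):
--         return yVel * t - t * (t - 1) // 2
--
--     if not (0 <= xTarget[1] and yTarget[0] <= 0):
--         return False
--     t = 1
--     while True:
--         x = xAt(t)
--         y = yAt(t)
--         if xTarget[0] <= x <= xTarget[1] and yTarget[0] <= y <= yTarget[1]:
--             return True
--         if not (x <= xTarget[1] and yTarget[0] <= y):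
--             return False
--         t += 1
-- ===== Notes on version B (the rewrite author's own statement) =====
-- stated objective: alternative
-- what changed: Replaces A's incremental mutation of velocities and positions with closed-form position formulas x(t)=xVel*t-t*(t-1)//2 (clamped once xVel is exhausted) and y(t)=yVel*t-t*(t-1)//2, scanned over the step index t with the same hit/termination tests.
import Mathlib
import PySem

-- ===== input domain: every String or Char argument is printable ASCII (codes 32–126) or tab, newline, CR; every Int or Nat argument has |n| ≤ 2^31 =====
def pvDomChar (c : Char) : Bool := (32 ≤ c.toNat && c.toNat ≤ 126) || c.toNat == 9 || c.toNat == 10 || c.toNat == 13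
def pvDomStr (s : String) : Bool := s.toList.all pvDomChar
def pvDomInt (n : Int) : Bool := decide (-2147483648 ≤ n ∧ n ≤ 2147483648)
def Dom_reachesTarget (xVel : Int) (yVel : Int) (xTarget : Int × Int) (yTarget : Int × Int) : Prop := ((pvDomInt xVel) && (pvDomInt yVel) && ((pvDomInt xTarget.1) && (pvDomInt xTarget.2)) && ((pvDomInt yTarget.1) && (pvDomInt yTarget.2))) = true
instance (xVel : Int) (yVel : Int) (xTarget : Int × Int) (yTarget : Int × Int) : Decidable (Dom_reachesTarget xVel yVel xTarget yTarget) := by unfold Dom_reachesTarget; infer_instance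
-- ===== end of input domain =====

-- B replaces A's incremental velocity/position mutation by closed-form positions
-- x(t), y(t) scanned over the step index t (objective: alternative decomposition, same cost).

-- fuel: a strictly decreasing measure of A's loop, evaluated at the start (+1);
-- a totality device only — the loop always exits via its own guard before fuel runs out.
def pvFuel (yVel : Int) (yLo : Int) : Nat :=
  (yVel + 1).toNat + (2 - 2 * yLo + (if 0 ≤ yVel then yVel * (yVel + 1) else 0)).toNat + 1

-- ===== PORT A =====
def loopA (xT yT : Int × Int) : Nat → Int → Int → Int → Int → Bool
  | 0, _, _, _, _ => false
  | Nat.succ n, xv, yv, xp, yp =>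
    if xp ≤ xT.2 ∧ yT.1 ≤ yp then
      let xp' := xp + xv
      let yp' := yp + yv
      let xv' := if 0 < xv then xv - 1 else xv
      let yv' := yv - 1
      if xT.1 ≤ xp' ∧ xp' ≤ xT.2 ∧ yT.1 ≤ yp' ∧ yp' ≤ yT.2 then true
      else loopA xT yT n xv' yv' xp' yp'
    else false

def reachesTarget (xVel : Int) (yVel : Int) (xTarget : Int × Int) (yTarget : Int × Int) : Bool :=
  loopA xTarget yTarget (pvFuel yVel yTarget.1) xVel yVel 0 0

-- ===== PORT B =====
def xAt (xVel t : Int) : Int :=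
  if xVel ≤ 0 then xVel * t
  else if xVel ≤ t then PySem.Int.floordiv (xVel * (xVel + 1)) 2
  else xVel * t - PySem.Int.floordiv (t * (t - 1)) 2

def yAt (yVel t : Int) : Int := yVel * t - PySem.Int.floordiv (t * (t - 1)) 2

def loopB (xVel yVel : Int) (xT yT : Int × Int) : Nat → Int → Bool
  | 0, _ => false
  | Nat.succ n, t =>
    let x := xAt xVel t
    let y := yAt yVel t
    if xT.1 ≤ x ∧ x ≤ xT.2 ∧ yT.1 ≤ y ∧ y ≤ yT.2 then true
    else if x ≤ xT.2 ∧ yT.1 ≤ y then loopB xVel yVel xT yT n (t + 1)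
    else false

def reachesTarget_alt (xVel : Int) (yVel : Int) (xTarget : Int × Int) (yTarget : Int × Int) : Bool :=
  if (0 : Int) ≤ xTarget.2 ∧ yTarget.1 ≤ 0 then
    loopB xVel yVel xTarget yTarget (pvFuel yVel yTarget.1) 1
  else false

-- ===== PRECONDITION & SPEC =====
def Spec_reachesTarget (xVel : Int) (yVel : Int) (xTarget : Int × Int) (yTarget : Int × Int) (out : Bool) : Prop := out = reachesTarget_alt xVel yVel xTarget yTarget
instance (xVel : Int) (yVel : Int) (xTarget : Int × Int) (yTarget : Int × Int) (out : Bool) : Decidable (Spec_reachesTarget xVel yVel xTarget yTarget out) := by unfold Spec_reachesTarget; infer_instance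

-- ===== CLAIM (what is proved, stated in full; the proofs are below) =====
def Claim_equal_reachesTarget : Prop := ∀ (xVel : Int) (yVel : Int) (xTarget : Int × Int) (yTarget : Int × Int), Dom_reachesTarget xVel yVel xTarget yTarget → Spec_reachesTarget xVel yVel xTarget yTarget (reachesTarget xVel yVel xTarget yTarget)

-- ===== LEMMAS AND PROOFS =====

-- A's x-velocity after t steps
def vAt (xVel t : Int) : Int := if xVel ≤ 0 then xVel else max (xVel - t) 0

lemma floordiv_consec (t : Int) : 2 * PySem.Int.floordiv (t * (t - 1)) 2 = t * (t - 1) := by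
  have h : PySem.Int.floordiv (t * (t - 1)) 2 = (t * (t - 1)) / 2 :=
    PySem.Int.floordiv_eq_ediv_of_pos (by omega)
  have hd : (2 : Int) ∣ t * (t - 1) := by
    rcases Int.even_or_odd t with he | ho
    · exact Dvd.dvd.mul_right he.two_dvd _
    · obtain ⟨k, hk⟩ := ho
      exact ⟨t * k, by subst hk; ring⟩
  rw [h, Int.mul_ediv_cancel' hd]

lemma stepY (yVel t : Int) : yAt yVel t + (yVel - t) = yAt yVel (t + 1) := by
  have h1 := floordiv_consec t
  have h2 := floordiv_consec (t + 1)
  unfold yAt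
  nlinarith [h1, h2]

lemma stepV (xVel t : Int) :
    (if 0 < vAt xVel t then vAt xVel t - 1 else vAt xVel t) = vAt xVel (t + 1) := by
  unfold vAt; split_ifs <;> omega

lemma stepX (xVel t : Int) (ht : 0 ≤ t) : xAt xVel t + vAt xVel t = xAt xVel (t + 1) := by
  unfold xAt vAt
  by_cases h0 : xVel ≤ 0
  · simp only [if_pos h0]; ring
  · simp only [if_neg h0]
    by_cases h1 : xVel ≤ t
    · have h2 : xVel ≤ t + 1 := by omega
      simp only [if_pos h1, if_pos h2]
      have : max (xVel - t) 0 = 0 := by omega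
      rw [this]; ring
    · have hm : max (xVel - t) 0 = xVel - t := by omega
      rw [hm]
      simp only [if_neg h1]
      by_cases h2 : xVel ≤ t + 1
      · have ht1 : t + 1 = xVel := by omega
        simp only [if_pos h2]
        have ha := floordiv_consec t
        have hb : 2 * PySem.Int.floordiv (xVel * (xVel + 1)) 2 = xVel * (xVel + 1) := by
          have h := floordiv_consec (xVel + 1)
          have e : (xVel + 1) * (xVel + 1 - 1) = xVel * (xVel + 1) := by ring
          rw [e] at h
          exact h
        nlinarith [ha, hb]
      · simp only [if_neg h2]
        have ha := floordiv_consec t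
        have hb := floordiv_consec (t + 1)
        nlinarith [ha, hb]

lemma loop_eq (xT yT : Int × Int) (xVel yVel : Int) :
    ∀ (n : Nat) (t : Int), 0 ≤ t →
      loopA xT yT n (vAt xVel t) (yVel - t) (xAt xVel t) (yAt yVel t)
        = (if xAt xVel t ≤ xT.2 ∧ yT.1 ≤ yAt yVel t then loopB xVel yVel xT yT n (t + 1)
           else false) := by
  intro n
  induction n with
  | zero => intro t ht; simp [loopA, loopB]
  | succ n ih =>
    intro t ht
    by_cases hg : xAt xVel t ≤ xT.2 ∧ yT.1 ≤ yAt yVel t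
    · rw [if_pos hg]
      show (if xAt xVel t ≤ xT.2 ∧ yT.1 ≤ yAt yVel t then _ else false) = _
      rw [if_pos hg]
      simp only [loopB]
      rw [stepX xVel t ht, stepY yVel t, stepV xVel t]
      have hyv : yVel - t - 1 = yVel - (t + 1) := by ring
      rw [hyv, ih (t + 1) (by omega)]
    · rw [if_neg hg]
      show (if xAt xVel t ≤ xT.2 ∧ yT.1 ≤ yAt yVel t then _ else false) = _
      rw [if_neg hg]

lemma xAt_zero (xVel : Int) : xAt xVel 0 = 0 := by
  unfold xAt
  by_cases h0 : xVel ≤ 0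
  · simp [h0]
  · have h1 : ¬ xVel ≤ (0 : Int) := h0
    simp only [if_neg h0]
    have := floordiv_consec (0 : Int)
    omega

lemma yAt_zero (yVel : Int) : yAt yVel 0 = 0 := by
  unfold yAt
  have := floordiv_consec (0 : Int)
  omega

lemma vAt_zero (xVel : Int) : vAt xVel 0 = xVel := by
  unfold vAt; split_ifs <;> omega

-- ===== VERDICT (by name: the statement is the Claim_ definition above) =====
theorem reachesTarget_spec : Claim_equal_reachesTarget := by
  intro xVel yVel xT yT _
  unfold Spec_reachesTarget reachesTarget reachesTarget_alt
  have h := loop_eq xT yT xVel yVel (pvFuel yVel yT.1) 0 le_rfl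
  rw [xAt_zero, yAt_zero, vAt_zero, sub_zero] at h
  rw [h]
  norm_num
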